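-- pv_equiv track=rewrite | github.com/eddiedunn/curator | src/curator/orchestrator.py | _format_diarized_text
-- ===== SOURCE A (Python) =====
-- def _format_diarized_text(segments: list[dict]) -> str:
--     """Format transcription segments into speaker-labeled paragraphs.
--
--     Groups consecutive same-speaker segments and prefixes each group
--     with the speaker label. Falls back to plain concatenation when
--     segments have no speaker field.
--     """
--     if not segments:
--         return ""
--
--     # Check if any segment has a non-None speaker
--     has_speakers = any(seg.get("speaker") for seg in segments)
--     if not has_speakers:
--         return " ".join(seg.get("text", "").strip() for seg in segments).strip()
--
--     paragraphs = []
--     current_speaker = None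
--     current_texts: list[str] = []
--
--     for seg in segments:
--         speaker = seg.get("speaker")
--         text = seg.get("text", "").strip()
--         if not text:
--             continue
--
--         if speaker != current_speaker:
--             if current_texts:
--                 label = f"{current_speaker}: " if current_speaker else ""
--                 paragraphs.append(f"{label}{' '.join(current_texts)}")
--             current_speaker = speaker
--             current_texts = [text]
--         else:
--             current_texts.append(text)
--
--     # Flush last group
--     if current_texts:
--         label = f"{current_speaker}: " if current_speaker else ""
--         paragraphs.append(f"{label}{' '.join(current_texts)}")
--
--     return "\n\n".join(paragraphs)
-- ===== SOURCE B (Python) =====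
-- def _format_diarized_text(segments: list[dict]) -> str:
--     """Format transcription segments into speaker-labeled paragraphs.
--
--     Same result as the accumulator version, computed by first filtering
--     the segments down to (speaker, stripped_text) pairs and then
--     rendering maximal runs of equal speakers recursively.
--     """
--     if not segments:
--         return ""
--
--     if not any(seg.get("speaker") for seg in segments):
--         return " ".join(seg.get("text", "").strip() for seg in segments).strip()
--
--     pairs = [(seg.get("speaker"), t) for seg in segments
--              if (t := seg.get("text", "").strip())]
--
--     def render(ps):
--         if not ps:
--             return []
--         sp = ps[0][0]
--         i = 1
--         while i < len(ps) and ps[i][0] == sp: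
--             i += 1
--         label = f"{sp}: " if sp else ""
--         return [label + " ".join(t for _, t in ps[:i])] + render(ps[i:])
--
--     return "\n\n".join(render(pairs))
-- ===== Notes on version B (the rewrite author's own statement) =====
-- stated objective: alternative
-- what changed: Replaces the single-pass mutable accumulator (current_speaker/current_texts with an explicit final flush) by a filter of (speaker, stripped_text) pairs followed by a recursive run-splitting renderer; the empty-input guard and the no-speakers fallback are kept verbatim.
import Mathlib
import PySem

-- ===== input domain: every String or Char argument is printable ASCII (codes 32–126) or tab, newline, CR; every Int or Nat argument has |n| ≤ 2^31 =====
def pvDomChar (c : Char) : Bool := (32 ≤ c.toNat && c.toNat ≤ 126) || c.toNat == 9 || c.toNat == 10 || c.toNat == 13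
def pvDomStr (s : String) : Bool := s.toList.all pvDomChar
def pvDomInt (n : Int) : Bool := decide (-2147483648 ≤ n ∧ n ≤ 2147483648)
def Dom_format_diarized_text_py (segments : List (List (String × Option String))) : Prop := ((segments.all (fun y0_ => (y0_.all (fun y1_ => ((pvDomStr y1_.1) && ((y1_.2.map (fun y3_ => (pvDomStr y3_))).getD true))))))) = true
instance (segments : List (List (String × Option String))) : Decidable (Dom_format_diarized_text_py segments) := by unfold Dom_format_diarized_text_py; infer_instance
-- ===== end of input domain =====

-- B replaces A's mutable accumulator loop by filter-pairs + recursive run-splitting rendering;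
-- equal return value on Pre_ (A mutates nothing).

-- shared faithful translations of the Python expressions both sources contain
-- seg.get("speaker")  (None when missing)
def pvSpeaker (seg : List (String × Option String)) : Option String :=
  ((PySem.Dict.mk seg).get? "speaker").getD none

-- truthiness of an Optional[str]: non-None and non-empty
def pvTruthy (v : Option String) : Bool :=
  match v with
  | some s => !(s == "")
  | none => false

-- seg.get("text", "").strip()  (total form: the Some-None case lies outside Pre_, where Python raises)
def pvText (seg : List (String × Option String)) : String :=
  PySem.Str.strip ((((PySem.Dict.mk seg).get? "text").getD (some "")).getD "")

-- f"{speaker}: " if speaker else ""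
def pvLabel (sp : Option String) : String :=
  if pvTruthy sp then sp.getD "" ++ ": " else ""

-- ===== PORT A =====
-- loop body of A's for-loop over segments (state: paragraphs, current_speaker, current_texts)
def pvStepA (st : List String × Option String × List String)
    (seg : List (String × Option String)) : List String × Option String × List String :=
  let (paragraphs, currentSpeaker, currentTexts) := st
  let speaker := pvSpeaker seg
  let text := pvText seg
  if text = "" then (paragraphs, currentSpeaker, currentTexts)
  else if speaker ≠ currentSpeaker then
    let paragraphs :=
      if currentTexts ≠ [] then
        paragraphs ++ [pvLabel currentSpeaker ++ PySem.Str.join " " currentTexts]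
      else paragraphs
    (paragraphs, speaker, [text])
  else (paragraphs, currentSpeaker, currentTexts ++ [text])

def format_diarized_text_py (segments : List (List (String × Option String))) : String :=
  if segments = [] then ""
  else
    let hasSpeakers := segments.any (fun seg => pvTruthy (pvSpeaker seg))
    if !hasSpeakers then
      PySem.Str.strip (PySem.Str.join " " (segments.map (fun seg => pvText seg)))
    else
      let st := segments.foldl pvStepA ([], none, [])
      let (paragraphs, currentSpeaker, currentTexts) := st
      let paragraphs :=
        if currentTexts ≠ [] then
          paragraphs ++ [pvLabel currentSpeaker ++ PySem.Str.join " " currentTexts]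
        else paragraphs
      PySem.Str.join "\n\n" paragraphs

-- ===== PORT B =====
-- the filtered (speaker, stripped_text) pairs
def pvPairs (segments : List (List (String × Option String))) : List (Option String × String) :=
  segments.filterMap (fun seg =>
    let t := pvText seg
    if t = "" then none else some (pvSpeaker seg, t))

-- render(ps): emit the leading maximal same-speaker run, recurse on the rest
def pvRender : List (Option String × String) → List String
  | [] => []
  | (sp, t) :: rest =>
      (pvLabel sp ++ PySem.Str.join " " (t :: (rest.takeWhile (fun p => p.1 == sp)).map (fun p => p.2)))
        :: pvRender (rest.dropWhile (fun p => p.1 == sp))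
termination_by ps => ps.length
decreasing_by
  have := List.length_dropWhile_le (fun p => p.1 == sp) rest
  simp; omega

def format_diarized_text_py_alt (segments : List (List (String × Option String))) : String :=
  if segments = [] then ""
  else if !(segments.any (fun seg => pvTruthy (pvSpeaker seg))) then
    PySem.Str.strip (PySem.Str.join " " (segments.map (fun seg => pvText seg)))
  else
    PySem.Str.join "\n\n" (pvRender (pvPairs segments))

-- ===== PRECONDITION & SPEC =====
-- Pre_ excludes only inputs where A raises: a segment whose "text" key is present with value None
-- makes Python call None.strip() (AttributeError); B raises there too.
def Pre_format_diarized_text_py (segments : List (List (String × Option String))) : Prop :=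
  ∀ seg ∈ segments, (PySem.Dict.mk seg).get? "text" ≠ some none
instance (segments : List (List (String × Option String))) : Decidable (Pre_format_diarized_text_py segments) := by unfold Pre_format_diarized_text_py; infer_instance

def pvWitness_format_diarized_text_py : (List (List (String × Option String))) :=
  [[("speaker", some "Alice"), ("text", some "hi")], [("speaker", some "Bob"), ("text", some "yo")]]

def Spec_format_diarized_text_py (segments : List (List (String × Option String))) (out : String) : Prop := out = format_diarized_text_py_alt segments
instance (segments : List (List (String × Option String))) (out : String) : Decidable (Spec_format_diarized_text_py segments out) := by unfold Spec_format_diarized_text_py; infer_instance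

-- ===== CLAIM (what is proved, stated in full; the proofs are below) =====
def Claim_equal_format_diarized_text_py : Prop := ∀ (segments : List (List (String × Option String))), Dom_format_diarized_text_py segments → Pre_format_diarized_text_py segments → Spec_format_diarized_text_py segments (format_diarized_text_py segments)

-- ===== LEMMAS AND PROOFS =====

-- proof-only: A's loop body restricted to the filtered pairs
def pvStep' (st : List String × Option String × List String)
    (p : Option String × String) : List String × Option String × List String :=
  let (paragraphs, cur, texts) := st
  if p.1 ≠ cur then
    ((if texts ≠ [] then paragraphs ++ [pvLabel cur ++ PySem.Str.join " " texts] else paragraphs),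
      p.1, [p.2])
  else (paragraphs, cur, texts ++ [p.2])

-- proof-only: A's final flush
def pvFlush (st : List String × Option String × List String) : List String :=
  if st.2.2 ≠ [] then st.1 ++ [pvLabel st.2.1 ++ PySem.Str.join " " st.2.2] else st.1

-- proof-only: A's run in progress, as a renderer continuation
def pvRenderC : Option String → List String → List (Option String × String) → List String
  | cur, acc, [] => [pvLabel cur ++ PySem.Str.join " " acc]
  | cur, acc, (sp, t) :: rest =>
      if sp = cur then pvRenderC cur (acc ++ [t]) rest
      else (pvLabel cur ++ PySem.Str.join " " acc) :: pvRenderC sp [t] rest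

theorem foldA_eq_fold_pairs (segments : List (List (String × Option String)))
    (st : List String × Option String × List String) :
    segments.foldl pvStepA st = (pvPairs segments).foldl pvStep' st := by
  induction segments generalizing st with
  | nil => rfl
  | cons seg rest ih =>
    obtain ⟨paras, cur, texts⟩ := st
    by_cases ht : pvText seg = ""
    · simp [pvPairs, ht, pvStepA, ih]
    · simp [pvPairs, ht, pvStepA, pvStep', ih]

theorem pvRender_cons (sp : Option String) (t : String) (rest : List (Option String × String)) :
    pvRender ((sp, t) :: rest) =
      (pvLabel sp ++ PySem.Str.join " " (t :: (rest.takeWhile (fun p => p.1 == sp)).map (fun p => p.2)))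
        :: pvRender (rest.dropWhile (fun p => p.1 == sp)) := by
  rw [pvRender.eq_def]

theorem renderC_eq (ps : List (Option String × String)) :
    ∀ (cur : Option String) (acc : List String),
    pvRenderC cur acc ps =
      (pvLabel cur ++ PySem.Str.join " " (acc ++ (ps.takeWhile (fun p => p.1 == cur)).map (fun p => p.2)))
        :: pvRender (ps.dropWhile (fun p => p.1 == cur)) := by
  induction ps with
  | nil => intro cur acc; simp [pvRenderC, pvRender]
  | cons p rest ih =>
    intro cur acc
    obtain ⟨sp, t⟩ := p
    by_cases h : sp = cur
    · subst h
      simp only [pvRenderC, List.takeWhile_cons, List.dropWhile_cons]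
      rw [ih]
      simp
    · have hb : ((sp, t).1 == cur) = false := by simp [h]
      simp only [pvRenderC, if_neg h, List.takeWhile_cons, List.dropWhile_cons, hb,
        Bool.false_eq_true, reduceIte]
      rw [ih sp [t], pvRender_cons]
      simp

theorem fold_flush_eq_renderC (ps : List (Option String × String)) :
    ∀ (paras : List String) (cur : Option String) (texts : List String), texts ≠ [] →
    pvFlush (ps.foldl pvStep' (paras, cur, texts)) = paras ++ pvRenderC cur texts ps := by
  induction ps with
  | nil => intro paras cur texts hne; simp [pvFlush, pvRenderC, hne]

  | cons p rest ih =>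
    intro paras cur texts hne
    obtain ⟨sp, t⟩ := p
    by_cases h : sp = cur
    · subst h
      simp only [List.foldl_cons, pvStep', ne_eq, not_true_eq_false, pvRenderC, reduceIte]
      rw [ih _ _ _ (by simp)]
    · simp only [List.foldl_cons, pvStep', ne_eq, h, not_false_eq_true, if_pos, pvRenderC,
        hne, reduceIte]
      rw [ih _ _ _ (by simp)]
      simp

theorem fold_flush_init (ps : List (Option String × String)) :
    pvFlush (ps.foldl pvStep' ([], none, [])) = pvRender ps := by
  cases ps with
  | nil => simp [pvFlush, pvRender]
  | cons p rest =>
    obtain ⟨sp, t⟩ := p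
    have hstep : pvStep' ([], none, ([] : List String)) (sp, t) = ([], sp, [t]) := by
      cases sp <;> simp [pvStep']
    rw [List.foldl_cons, hstep, fold_flush_eq_renderC rest [] sp [t] (by simp),
      renderC_eq, pvRender_cons]
    simp

-- ===== VERDICT (by name: the statement is the Claim_ definition above) =====
theorem format_diarized_text_py_spec : Claim_equal_format_diarized_text_py := by
  intro segments _ _
  unfold Spec_format_diarized_text_py format_diarized_text_py format_diarized_text_py_alt
  by_cases hnil : segments = []
  · simp [hnil]
  · simp only [hnil, reduceIte]
    by_cases hs : segments.any (fun seg => pvTruthy (pvSpeaker seg))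
    · simp only [hs, Bool.not_true, Bool.false_eq_true, reduceIte]
      rw [foldA_eq_fold_pairs, ← fold_flush_init (pvPairs segments)]
      generalize (pvPairs segments).foldl pvStep' ([], none, []) = st
      obtain ⟨p, c, t⟩ := st
      simp [pvFlush]
    · simp [hs]
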